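-- pv_equiv track=rewrite | github.com/linovallejo/LFP_PY2_9017323 | principal.py | estado7Valido
-- ===== SOURCE A (Python) =====
-- def estado7Valido(lexema):
--     valido = False
--     for i in range(0, len(lexema), 1):
--         if (lexema[i].isdigit()):
--             valido = True
--         else:
--             valido = False
--     return valido
-- ===== SOURCE B (Python) =====
-- def estado7Valido(lexema):
--     return bool(lexema) and lexema[-1].isdigit()
-- ===== Notes on version B (the rewrite author's own statement) =====
-- stated objective: simpler
-- what changed: A's loop overwrites `valido` each iteration so only the final character matters; B drops the loop and directly checks whether the last character (if any) is a digit.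
import Mathlib
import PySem

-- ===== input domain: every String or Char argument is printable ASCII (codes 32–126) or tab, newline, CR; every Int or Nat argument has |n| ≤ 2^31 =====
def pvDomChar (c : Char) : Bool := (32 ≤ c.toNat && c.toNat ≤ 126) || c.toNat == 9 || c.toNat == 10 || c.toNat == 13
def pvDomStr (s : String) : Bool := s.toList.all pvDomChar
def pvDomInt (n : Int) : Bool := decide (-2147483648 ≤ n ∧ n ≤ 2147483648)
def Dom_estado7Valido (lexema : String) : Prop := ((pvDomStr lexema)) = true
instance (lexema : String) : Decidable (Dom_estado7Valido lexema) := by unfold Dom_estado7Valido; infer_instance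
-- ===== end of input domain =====

-- ===== PORT A =====
-- A: loop over indices, valido reset each step to whether lexema[i] is a digit.
def estado7Valido (lexema : String) : Bool :=
  lexema.toList.foldl (fun _valido c => if PySem.Chars.isdigit c then true else false) false

-- ===== PORT B =====
-- B: only the last character matters; no iteration.  (simpler/faster: closed form)
def estado7Valido_alt (lexema : String) : Bool :=
  match lexema.toList.getLast? with
  | none => false
  | some c => PySem.Chars.isdigit c

-- ===== PRECONDITION & SPEC =====
def Spec_estado7Valido (lexema : String) (out : Bool) : Prop := out = estado7Valido_alt lexema
instance (lexema : String) (out : Bool) : Decidable (Spec_estado7Valido lexema out) := by unfold Spec_estado7Valido; infer_instance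

-- ===== CLAIM (what is proved, stated in full; the proofs are below) =====
def Claim_equal_estado7Valido : Prop := ∀ (lexema : String), Dom_estado7Valido lexema → Spec_estado7Valido lexema (estado7Valido lexema)

-- ===== LEMMAS AND PROOFS =====

-- ===== VERDICT (by name: the statement is the Claim_ definition above) =====
theorem foldl_last (cs : List Char) (b : Bool) :
    cs.foldl (fun _valido c => if PySem.Chars.isdigit c then true else false) b =
      (match cs.getLast? with
       | none => b
       | some c => if PySem.Chars.isdigit c then true else false) := by
  induction cs generalizing b with
  | nil => rfl
  | cons x xs ih =>
    simp only [List.foldl_cons, ih]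
    cases xs with
    | nil => rfl
    | cons y ys =>
      cases h : (y :: ys).getLast? with
      | none => simp at h
      | some c => simp [h]

theorem estado7Valido_spec : Claim_equal_estado7Valido := by
  intro lexema _
  unfold Spec_estado7Valido estado7Valido estado7Valido_alt
  rw [foldl_last]
  cases h : lexema.toList.getLast? with
  | none => rfl
  | some c => simp
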